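-- pv_equiv track=rewrite | github.com/lne-lab/rsERG | MEA_burst_detect_v9C8.py | compute_shared_intervals
-- ===== SOURCE A (Python) =====
-- def compute_shared_intervals(burst_intervals, threshold):
--     events = []
--     for start, end in burst_intervals:
--         events.append((start, 1))
--         events.append((end, -1))
--     events.sort(key=lambda x: (x[0], -x[1]))
--
--     intervals = []
--     cum = 0
--     current_start = None
--     for time, delta in events:
--         prev = cum
--         cum += delta
--         if prev < threshold and cum >= threshold:
--             current_start = time
--         elif prev >= threshold and cum < threshold and current_start is not None:
--             intervals.append((current_start, time))
--             current_start = None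
--
--     if not intervals:
--         return []
--
--     # Expand intervals to cover the union of all overlapping bursts within them
--     expanded = []
--     for (start_int, end_int) in intervals:
--         relevant = []
--         for (bstart, bend) in burst_intervals:
--             if (bstart < end_int) and (bend > start_int):
--                 relevant.append((bstart, bend))
--         if relevant:
--             new_start = min(b[0] for b in relevant)
--             new_end   = max(b[1] for b in relevant)
--         else:
--             new_start, new_end = start_int, end_int
--         expanded.append((new_start, new_end))
--
--     # Merge any intervals that might overlap
--     expanded.sort(key=lambda x: x[0])
--     merged = []
--     current = expanded[0]
--     for i in range(1, len(expanded)):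
--         nxt = expanded[i]
--         if nxt[0] <= current[1]:
--             current = (current[0], max(current[1], nxt[1]))
--         else:
--             merged.append(current)
--             current = nxt
--     merged.append(current)
--
--     return merged
-- ===== SOURCE B (Python) =====
-- def compute_shared_intervals(burst_intervals, threshold):
--     events = []
--     for start, end in burst_intervals:
--         events.append((start, 1))
--         events.append((end, -1))
--     events.sort(key=lambda x: (x[0], -x[1]))
--
--     intervals = []
--     cum = 0
--     current_start = None
--     for time, delta in events:
--         prev = cum
--         cum += delta
--         if prev < threshold and cum >= threshold:
--             current_start = time
--         elif prev >= threshold and cum < threshold and current_start is not None: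
--             intervals.append((current_start, time))
--             current_start = None
--
--     if not intervals:
--         return []
--
--     # Sort the bursts once; expand every threshold interval by a single
--     # two-pointer sweep instead of rescanning all bursts per interval.
--     n = len(burst_intervals)
--     by_start = sorted(burst_intervals, key=lambda b: b[0])
--     by_end = sorted(burst_intervals, key=lambda b: b[1])
--     # tail[j] = (end of by_end[j], min start among by_end[j:])
--     tail = []
--     m = None
--     for bs, be in reversed(by_end):
--         m = bs if m is None else min(m, bs)
--         tail.append((be, m))
--     tail.reverse()
--
--     expanded = []
--     i = 0          # bursts of by_start[:i] are exactly those starting before the interval end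
--     j = 0          # bursts of by_end[j:] are exactly those ending after the interval start
--     pm = None      # max end among by_start[:i]
--     for s, e in intervals:
--         while i < n and by_start[i][0] < e:
--             be = by_start[i][1]
--             pm = be if pm is None else max(pm, be)
--             i += 1
--         while j < n and tail[j][0] <= s:
--             j += 1
--         if pm is not None and pm > s:
--             expanded.append((tail[j][1], pm))
--         else:
--             expanded.append((s, e))
--
--     expanded.sort(key=lambda x: x[0])
--     merged = []
--     current = expanded[0]
--     for nxt in expanded[1:]:
--         if nxt[0] <= current[1]:
--             current = (current[0], max(current[1], nxt[1]))
--         else: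
--             merged.append(current)
--             current = nxt
--     merged.append(current)
--     return merged
-- ===== Notes on version B (the rewrite author's own statement) =====
-- stated objective: faster
-- what changed: A rescans the whole burst list for every threshold interval to expand it (O(n*m)); B sorts the bursts once by start and by end, precomputes suffix minima of starts, and expands all threshold intervals in one two-pointer sweep with a running prefix maximum of ends.
import Mathlib
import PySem

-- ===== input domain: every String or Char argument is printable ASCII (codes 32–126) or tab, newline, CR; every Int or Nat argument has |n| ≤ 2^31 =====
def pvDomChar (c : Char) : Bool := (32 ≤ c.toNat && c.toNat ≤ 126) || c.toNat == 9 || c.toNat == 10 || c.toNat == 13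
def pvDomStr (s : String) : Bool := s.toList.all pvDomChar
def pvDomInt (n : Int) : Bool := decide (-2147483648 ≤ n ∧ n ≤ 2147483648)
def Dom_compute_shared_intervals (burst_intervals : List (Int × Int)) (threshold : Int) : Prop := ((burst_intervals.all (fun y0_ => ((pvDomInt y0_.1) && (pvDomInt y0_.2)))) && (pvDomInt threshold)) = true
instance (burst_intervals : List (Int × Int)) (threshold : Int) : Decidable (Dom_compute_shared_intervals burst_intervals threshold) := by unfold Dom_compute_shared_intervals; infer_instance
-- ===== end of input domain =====

-- B replaces A's per-interval rescan of all bursts by sorting the bursts once and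
-- expanding all threshold intervals in a single two-pointer sweep (objective: faster).


-- ===== PORT A =====
-- shared by both ports because Source A and Source B contain the identical event-sweep
-- and merge code (B's changes are confined to the expansion step)
def pvEvents (bi : List (Int × Int)) : List (Int × Int) :=
  bi.foldl (fun ev se => ev ++ [(se.1, 1), (se.2, -1)]) []

def pvSweepStep (threshold : Int) (st : Int × Option Int × List (Int × Int)) (ev : Int × Int) :
    Int × Option Int × List (Int × Int) :=
  let prev := st.1
  let cum := prev + ev.2
  if prev < threshold ∧ threshold ≤ cum then
    (cum, some ev.1, st.2.2)
  else if threshold ≤ prev ∧ cum < threshold then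
    match st.2.1 with
    | some c => (cum, none, st.2.2 ++ [(c, ev.1)])
    | none => (cum, st.2.1, st.2.2)
  else (cum, st.2.1, st.2.2)

def pvSweep (bi : List (Int × Int)) (threshold : Int) : List (Int × Int) :=
  ((PySem.List.sorted2 (pvEvents bi) (fun x => x.1) (fun x => -x.2)).foldl
    (pvSweepStep threshold) (0, none, [])).2.2

def pvMergeLoop (cur : Int × Int) : List (Int × Int) → List (Int × Int)
  | [] => [cur]
  | nxt :: rest =>
    if nxt.1 ≤ cur.2 then pvMergeLoop (cur.1, max cur.2 nxt.2) rest
    else cur :: pvMergeLoop nxt rest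

def pvMerge (ex : List (Int × Int)) : List (Int × Int) :=
  match PySem.List.sorted ex (fun x => x.1) with
  | [] => []          -- unreachable: pvMerge is only called on a non-empty list
  | c :: rest => pvMergeLoop c rest

-- A's expansion: rescan the whole burst list for every threshold interval
def pvRelevant (bi : List (Int × Int)) (s e : Int) : List (Int × Int) :=
  bi.filter (fun b => decide (b.1 < e) && decide (b.2 > s))

def pvExpandA (bi : List (Int × Int)) (iv : Int × Int) : Int × Int :=
  match pvRelevant bi iv.1 iv.2 with
  | [] => iv
  | r :: rs => ((rs.map Prod.fst).foldl min r.1, (rs.map Prod.snd).foldl max r.2)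

def compute_shared_intervals (burst_intervals : List (Int × Int)) (threshold : Int) : List (Int × Int) :=
  let ivs := pvSweep burst_intervals threshold
  if ivs = [] then []
  else pvMerge (ivs.map (fun iv => pvExpandA burst_intervals iv))

-- ===== PORT B =====
-- tail list: each burst of the end-sorted list paired with the minimum start of its suffix
def pvTail : List (Int × Int) → List (Int × Int)
  | [] => []
  | b :: rest =>
    match pvTail rest with
    | [] => [(b.2, b.1)]
    | (e, m) :: t => (b.2, min b.1 m) :: (e, m) :: t

def pvOptMax (pm : Option Int) (v : Int) : Option Int :=
  match pm with
  | none => some v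
  | some M => some (max M v)

-- advance the start-sorted pointer past bursts starting before e, keeping the running max end
def pvAdvS (e : Int) : List (Int × Int) → Option Int → List (Int × Int) × Option Int
  | [], pm => ([], pm)
  | x :: rest, pm => if x.1 < e then pvAdvS e rest (pvOptMax pm x.2) else (x :: rest, pm)

-- advance the tail pointer past bursts ending at or before s
def pvAdvT (s : Int) : List (Int × Int) → List (Int × Int)
  | [] => []
  | t :: rest => if t.1 ≤ s then pvAdvT s rest else t :: rest

def pvItem (iv : Int × Int) (pm : Option Int) (tl : List (Int × Int)) : Int × Int :=
  match pm with
  | some M => if M > iv.1 then (match tl with | t :: _ => (t.2, M) | [] => iv) else iv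
  | none => iv

def pvExpB : List (Int × Int) → List (Int × Int) → Option Int → List (Int × Int) → List (Int × Int)
  | [], _, _, _ => []
  | iv :: ivs, remS, pm, tl =>
    let st := pvAdvS iv.2 remS pm
    let tl' := pvAdvT iv.1 tl
    pvItem iv st.2 tl' :: pvExpB ivs st.1 st.2 tl'

def compute_shared_intervals_alt (burst_intervals : List (Int × Int)) (threshold : Int) : List (Int × Int) :=
  let ivs := pvSweep burst_intervals threshold
  if ivs = [] then []
  else
    pvMerge (pvExpB ivs (PySem.List.sorted burst_intervals (fun x => x.1)) none
      (pvTail (PySem.List.sorted burst_intervals (fun x => x.2))))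

-- ===== PRECONDITION & SPEC =====
def Spec_compute_shared_intervals (burst_intervals : List (Int × Int)) (threshold : Int) (out : List (Int × Int)) : Prop := out = compute_shared_intervals_alt burst_intervals threshold
instance (burst_intervals : List (Int × Int)) (threshold : Int) (out : List (Int × Int)) : Decidable (Spec_compute_shared_intervals burst_intervals threshold out) := by unfold Spec_compute_shared_intervals; infer_instance

-- ===== CLAIM (what is proved, stated in full; the proofs are below) =====
def Claim_equal_compute_shared_intervals : Prop := ∀ (burst_intervals : List (Int × Int)) (threshold : Int), Dom_compute_shared_intervals burst_intervals threshold → Spec_compute_shared_intervals burst_intervals threshold (compute_shared_intervals burst_intervals threshold)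

-- ===== LEMMAS AND PROOFS =====

-- the endpoints of the sweep's intervals, flattened in order
def pvFlat (ivs : List (Int × Int)) : List Int := ivs.flatMap (fun p => [p.1, p.2])

theorem pv_dropWhile_dropWhile {α : Type} (p q : α → Bool) (h : ∀ x, q x = true → p x = true) :
    ∀ l : List α, (l.dropWhile q).dropWhile p = l.dropWhile p := by
  intro l
  induction l with
  | nil => rfl
  | cons x t ih =>
    by_cases hq : q x = true
    · simp [List.dropWhile_cons, hq, h x hq, ih]
    · simp [List.dropWhile_cons, hq]

theorem pv_takeWhile_split {α : Type} (p q : α → Bool) (h : ∀ x, q x = true → p x = true) :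
    ∀ l : List α, l.takeWhile p = l.takeWhile q ++ (l.dropWhile q).takeWhile p := by
  intro l
  induction l with
  | nil => rfl
  | cons x t ih =>
    by_cases hq : q x = true
    · simp [List.takeWhile_cons, List.dropWhile_cons, hq, h x hq, ih]
    · simp [List.takeWhile_cons, List.dropWhile_cons, hq]

theorem pv_advS_spec (e : Int) :
    ∀ (L : List (Int × Int)) (pm : Option Int),
      pvAdvS e L pm =
        (L.dropWhile (fun x => decide (x.1 < e)),
         ((L.takeWhile (fun x => decide (x.1 < e))).map Prod.snd).foldl pvOptMax pm) := by
  intro L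
  induction L with
  | nil => intro pm; rfl
  | cons x t ih =>
    intro pm
    by_cases hx : x.1 < e
    · simp [pvAdvS, hx, List.dropWhile_cons, List.takeWhile_cons, ih]
    · simp [pvAdvS, hx, List.dropWhile_cons, List.takeWhile_cons]

theorem pv_advT_tail (s : Int) :
    ∀ L : List (Int × Int), pvAdvT s (pvTail L) = pvTail (L.dropWhile (fun x => decide (x.2 ≤ s))) := by
  intro L
  induction L with
  | nil => rfl
  | cons x t ih =>
    by_cases hx : x.2 ≤ s
    · have : pvAdvT s (pvTail (x :: t)) = pvAdvT s (pvTail t) := by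
        cases ht : pvTail t with
        | nil => simp [pvTail, ht, pvAdvT, hx]
        | cons y ys => cases y with | mk e m => simp [pvTail, ht, pvAdvT, hx]
      rw [this, ih]; simp [List.dropWhile_cons, hx]
    · have : pvAdvT s (pvTail (x :: t)) = pvTail (x :: t) := by
        cases ht : pvTail t with
        | nil => simp [pvTail, ht, pvAdvT, hx]
        | cons y ys => cases y with | mk e m => simp [pvTail, ht, pvAdvT, hx]
      rw [this]; simp [List.dropWhile_cons, hx]

theorem pv_foldl_min_comm : ∀ (t : List Int) (x y : Int), min x (t.foldl min y) = t.foldl min (min x y) := by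
  intro t
  induction t with
  | nil => intro x y; rfl
  | cons z t ih =>
    intro x y
    simp only [List.foldl_cons]
    rw [ih, min_assoc]

theorem pv_tail_cons (x : Int × Int) (L : List (Int × Int)) :
    pvTail (x :: L) = (x.2, (L.map Prod.fst).foldl min x.1) :: pvTail L := by
  induction L generalizing x with
  | nil => rfl
  | cons y t ih =>
    rw [show pvTail (x :: y :: t) = (match pvTail (y :: t) with
      | [] => [(x.2, x.1)]
      | (e, m) :: t' => (x.2, min x.1 m) :: (e, m) :: t') from rfl]
    rw [ih y]
    simp only [List.map_cons, List.foldl_cons]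
    rw [pv_foldl_min_comm]

theorem pv_optmax_fold (xs : List Int) :
    xs.foldl pvOptMax none = PySem.List.max? xs (fun y => y) := by
  have aux : ∀ (t : List Int) (x : Int), t.foldl pvOptMax (some x) = some (t.foldl max x) := by
    intro t
    induction t with
    | nil => intro x; rfl
    | cons z t ih => intro x; simp only [List.foldl_cons]; exact ih (max x z)
  cases xs with
  | nil => rfl
  | cons x t =>
    rw [PySem.List.max?_id_cons]
    simp only [List.foldl_cons]
    exact aux t x

theorem pv_events_mem (bi : List (Int × Int)) (ev : Int × Int) :
    ev ∈ pvEvents bi ↔ ∃ p ∈ bi, ev = (p.1, 1) ∨ ev = (p.2, -1) := by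
  unfold pvEvents
  rw [PySem.List.foldl_append_eq_flatMap]
  simp [List.mem_flatMap]

theorem pv_tw_filter {α : Type} (key : α → Int) (p : α → Bool)
    (hp : ∀ x y, key x ≤ key y → p y = true → p x = true) :
    ∀ l : List α, List.Pairwise (fun a b => key a ≤ key b) l →
      l.takeWhile p = l.filter p ∧ l.dropWhile p = l.filter (fun x => !p x) := by
  intro l
  induction l with
  | nil => intro _; exact ⟨rfl, rfl⟩
  | cons x t ih =>
    intro hpw
    rcases List.pairwise_cons.1 hpw with ⟨hx, ht⟩
    rcases ih ht with ⟨ih1, ih2⟩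
    by_cases hpx : p x = true
    · simp [List.takeWhile_cons, List.dropWhile_cons, List.filter_cons, hpx, ih1, ih2]
    · have hall : ∀ y ∈ t, p y = false := by
        intro y hy
        by_contra hc
        exact hpx (hp x y (hx y hy) (by revert hc; cases p y <;> simp))
      have hfilt : t.filter p = [] := by
        rw [List.filter_eq_nil_iff]; intro y hy; simp [hall y hy]
      have hfilt2 : t.filter (fun x => !p x) = t := by
        rw [List.filter_eq_self]; intro y hy; simp [hall y hy]
      constructor
      · simp [List.takeWhile_cons, List.filter_cons, hpx, hfilt]
      · simp [List.dropWhile_cons, List.filter_cons, hpx, hfilt2]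


theorem pv_insertBy_pw (before : (Int × Int) → (Int × Int) → Bool)
    (h1 : ∀ a b, before a b = true → a.1 ≤ b.1)
    (h2 : ∀ a b, before a b = false → b.1 ≤ a.1) (x : Int × Int) :
    ∀ acc : List (Int × Int),
      List.Pairwise (fun p q : Int × Int => p.1 ≤ q.1) acc →
      List.Pairwise (fun p q : Int × Int => p.1 ≤ q.1) (PySem.List.insertBy before x acc) := by
  intro acc
  induction acc with
  | nil => intro _; simp [PySem.List.insertBy]
  | cons y ys ih =>
    intro hpw
    rcases List.pairwise_cons.1 hpw with ⟨hy, hys⟩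
    by_cases hb : before x y = true
    · rw [show PySem.List.insertBy before x (y :: ys) = x :: y :: ys by simp [PySem.List.insertBy, hb]]
      refine List.pairwise_cons.2 ⟨?_, hpw⟩
      intro z hz
      rcases List.mem_cons.1 hz with rfl | hz'
      · exact h1 x z hb
      · exact le_trans (h1 x y hb) (hy z hz')
    · have hb' : before x y = false := by revert hb; cases before x y <;> simp
      rw [show PySem.List.insertBy before x (y :: ys) = y :: PySem.List.insertBy before x ys by
        simp [PySem.List.insertBy, hb']]
      refine List.pairwise_cons.2 ⟨?_, ih hys⟩
      intro z hz
      rcases (PySem.List.mem_insertBy before x z ys).1 hz with rfl | hz'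
      · exact h2 _ y hb'
      · exact hy z hz'

theorem pv_sorted2_pairwise_fst (xs : List (Int × Int)) :
    List.Pairwise (fun p q : Int × Int => p.1 ≤ q.1)
      (PySem.List.sorted2 xs (fun x => x.1) (fun x => -x.2)) := by
  have h1 : ∀ a b : Int × Int,
      (decide (a.1 < b.1) || (!decide (b.1 < a.1) && decide (-a.2 < -b.2))) = true → a.1 ≤ b.1 := by
    intro a b h; simp at h; omega
  have h2 : ∀ a b : Int × Int,
      (decide (a.1 < b.1) || (!decide (b.1 < a.1) && decide (-a.2 < -b.2))) = false → b.1 ≤ a.1 := by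
    intro a b h; simp at h; omega
  have main : ∀ (l : List (Int × Int)) (acc : List (Int × Int)),
      List.Pairwise (fun p q : Int × Int => p.1 ≤ q.1) acc →
      List.Pairwise (fun p q : Int × Int => p.1 ≤ q.1)
        (l.foldl (fun acc x => PySem.List.insertBy
          (fun a b => decide (a.1 < b.1) || (!decide (b.1 < a.1) && decide (-a.2 < -b.2))) x acc) acc) := by
    intro l
    induction l with
    | nil => intro acc h; exact h
    | cons x t ih =>
      intro acc h
      exact ih _ (pv_insertBy_pw _ h1 h2 x acc h)
  exact main xs [] (by simp)


theorem pv_flat_append (ivs : List (Int × Int)) (p : Int × Int) :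
    pvFlat (ivs ++ [p]) = pvFlat ivs ++ [p.1, p.2] := by
  simp [pvFlat]

theorem pv_sweep_aux (thr : Int) :
    ∀ (evs : List (Int × Int)) (a cum : Int) (cs : Option Int) (ivs : List (Int × Int)),
      List.Pairwise (fun p q : Int × Int => p.1 ≤ q.1) evs →
      (∀ ev ∈ evs, ∀ x ∈ a :: (pvFlat ivs ++ cs.toList), x ≤ ev.1) →
      List.Pairwise (· ≤ ·) (a :: (pvFlat ivs ++ cs.toList)) →
      List.Pairwise (· ≤ ·) (a :: pvFlat (evs.foldl (pvSweepStep thr) (cum, cs, ivs)).2.2) := by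
  intro evs
  induction evs with
  | nil =>
    intro a cum cs ivs _ _ h3
    simp only [List.foldl_nil]
    exact h3.sublist ((List.sublist_append_left _ _).cons₂ a)
  | cons ev rest ih =>
    intro a cum cs ivs h1 h2 h3
    rcases List.pairwise_cons.1 h1 with ⟨hev, hrest⟩
    have hall : ∀ x ∈ a :: (pvFlat ivs ++ cs.toList), x ≤ ev.1 := h2 ev List.mem_cons_self
    have h2rest : ∀ q ∈ rest, ∀ x ∈ a :: (pvFlat ivs ++ cs.toList), x ≤ q.1 :=
      fun q hq => h2 q (List.mem_cons_of_mem _ hq)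
    simp only [List.foldl_cons]
    by_cases hb1 : cum < thr ∧ thr ≤ cum + ev.2
    · rw [show pvSweepStep thr (cum, cs, ivs) ev = (cum + ev.2, some ev.1, ivs) by
        simp [pvSweepStep, hb1]]
      apply ih _ _ _ _ hrest
      · intro q hq x hx
        simp only [Option.toList_some] at hx
        rcases List.mem_cons.1 hx with rfl | hx'
        · exact h2rest q hq x List.mem_cons_self
        · rcases List.mem_append.1 hx' with hx'' | hx''
          · exact h2rest q hq x (List.mem_cons_of_mem _ (List.mem_append_left _ hx''))
          · rw [List.mem_singleton.1 hx'']; exact hev q hq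
      · simp only [Option.toList_some]
        have hpre : List.Pairwise (· ≤ ·) (a :: pvFlat ivs) :=
          h3.sublist ((List.sublist_append_left _ _).cons₂ a)
        have hshape : a :: (pvFlat ivs ++ [ev.1]) = (a :: pvFlat ivs) ++ [ev.1] := by simp
        rw [hshape, List.pairwise_append]
        refine ⟨hpre, List.pairwise_singleton _ _, ?_⟩
        intro x hx y hy
        rw [List.mem_singleton.1 hy]
        rcases List.mem_cons.1 hx with rfl | hx'
        · exact hall x List.mem_cons_self
        · exact hall x (List.mem_cons_of_mem _ (List.mem_append_left _ hx'))
    · by_cases hb2 : thr ≤ cum ∧ cum + ev.2 < thr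
      · cases cs with
        | some c =>
          rw [show pvSweepStep thr (cum, some c, ivs) ev
              = (cum + ev.2, none, ivs ++ [(c, ev.1)]) by simp [pvSweepStep, hb1, hb2]]
          apply ih _ _ _ _ hrest
          · intro q hq x hx
            simp only [Option.toList_none, List.append_nil, pv_flat_append] at hx
            rcases List.mem_cons.1 hx with rfl | hx'
            · exact h2rest q hq x List.mem_cons_self
            · rcases List.mem_append.1 hx' with hx'' | hx''
              · exact h2rest q hq x (List.mem_cons_of_mem _ (List.mem_append_left _ hx''))
              · rcases List.mem_cons.1 hx'' with rfl | hx3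
                · exact h2rest q hq x (List.mem_cons_of_mem _ (List.mem_append_right _ (by simp)))
                · rw [List.mem_singleton.1 hx3]; exact hev q hq
          · simp only [Option.toList_none, List.append_nil, pv_flat_append]
            simp only [Option.toList_some] at h3 hall
            have hshape : a :: (pvFlat ivs ++ [c, ev.1])
                = (a :: (pvFlat ivs ++ [c])) ++ [ev.1] := by simp
            rw [hshape, List.pairwise_append]
            exact ⟨h3, List.pairwise_singleton _ _,
              fun x hx y hy => by rw [List.mem_singleton.1 hy]; exact hall x hx⟩
        | none =>
          rw [show pvSweepStep thr (cum, (none : Option Int), ivs) ev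
              = (cum + ev.2, none, ivs) by simp [pvSweepStep, hb1, hb2]]
          exact ih _ _ _ _ hrest h2rest h3
      · have : pvSweepStep thr (cum, cs, ivs) ev = (cum + ev.2, cs, ivs) := by
          cases cs <;> simp [pvSweepStep, hb1, hb2]
        rw [this]
        exact ih _ _ _ _ hrest h2rest h3


theorem pv_item_eq (bi : List (Int × Int)) (s e : Int) :
    pvItem (s, e)
      ((((PySem.List.sorted bi (fun x => x.1)).takeWhile (fun x => decide (x.1 < e))).map Prod.snd).foldl pvOptMax none)
      (pvTail ((PySem.List.sorted bi (fun x => x.2)).dropWhile (fun x => decide (x.2 ≤ s))))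
    = pvExpandA bi (s, e) := by
  have hTW := (pv_tw_filter (fun x : Int × Int => x.1) (fun x => decide (x.1 < e))
    (by intro x y hxy hy; dsimp only at hxy; simp at hy ⊢; omega)
    (PySem.List.sorted bi (fun x => x.1)) (PySem.List.sorted_pairwise bi _)).1
  have hDW := (pv_tw_filter (fun x : Int × Int => x.2) (fun x => decide (x.2 ≤ s))
    (by intro x y hxy hy; dsimp only at hxy; simp at hy ⊢; omega)
    (PySem.List.sorted bi (fun x => x.2)) (PySem.List.sorted_pairwise bi _)).2
  rw [hTW, hDW, pv_optmax_fold]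
  set F := (PySem.List.sorted bi (fun x => x.1)).filter (fun x => decide (x.1 < e)) with hF
  set G := (PySem.List.sorted bi (fun x => x.2)).filter (fun x => !decide (x.2 ≤ s)) with hG
  have hFiff : ∀ x : Int × Int, x ∈ F ↔ x ∈ bi ∧ x.1 < e := by
    intro x
    rw [hF, List.mem_filter, (PySem.List.sorted_perm bi (fun x => x.1) false).mem_iff]
    simp
  have hGiff : ∀ x : Int × Int, x ∈ G ↔ x ∈ bi ∧ s < x.2 := by
    intro x
    rw [hG, List.mem_filter, (PySem.List.sorted_perm bi (fun x => x.2) false).mem_iff]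
    simp
  have hreliff : ∀ x : Int × Int, x ∈ pvRelevant bi s e ↔ x ∈ bi ∧ x.1 < e ∧ s < x.2 := by
    intro x; rw [pvRelevant, List.mem_filter]; simp
  cases hm : PySem.List.max? (F.map Prod.snd) (fun y => y) with
  | none =>
    have hFnil : F = [] := by
      have := (PySem.List.max?_eq_none_iff (F.map Prod.snd) (fun y => y)).1 hm
      exact List.map_eq_nil_iff.1 this
    have hrel : pvRelevant bi s e = [] := by
      rw [List.eq_nil_iff_forall_not_mem]
      intro x hx
      rcases (hreliff x).1 hx with ⟨hxbi, hxe, _⟩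
      have : x ∈ F := (hFiff x).2 ⟨hxbi, hxe⟩
      rw [hFnil] at this; exact absurd this (List.not_mem_nil)
    simp [pvItem, pvExpandA, hrel]
  | some M =>
    have hMub : ∀ y ∈ F.map Prod.snd, y ≤ M := PySem.List.max?_isMax hm
    rcases List.mem_map.1 (PySem.List.max?_mem hm) with ⟨bstar, hbstarF, hbstar2⟩
    by_cases hMs : M > s
    · -- relevant is non-empty
      have hbstarRel : bstar ∈ pvRelevant bi s e := by
        rcases (hFiff bstar).1 hbstarF with ⟨hbi, hlt⟩
        exact (hreliff bstar).2 ⟨hbi, hlt, by omega⟩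
      cases hrel : pvRelevant bi s e with
      | nil => rw [hrel] at hbstarRel; exact absurd hbstarRel (List.not_mem_nil)
      | cons r rs =>
        -- A's max equals M
        have hMA : PySem.List.max? ((r :: rs).map Prod.snd) (fun y => y)
            = some ((rs.map Prod.snd).foldl max r.2) := by
          simp only [List.map_cons]; exact PySem.List.max?_id_cons _ _
        set MA := (rs.map Prod.snd).foldl max r.2 with hMAdef
        have hMAmem : MA ∈ (r :: rs).map Prod.snd := List.map_cons ▸ PySem.List.max?_mem hMA
        have hMAub : ∀ y ∈ (r :: rs).map Prod.snd, y ≤ MA := PySem.List.max?_isMax hMA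
        have hrelsubF : ∀ x : Int × Int, x ∈ r :: rs → x ∈ F := by
          intro x hx
          rcases (hreliff x).1 (hrel ▸ hx) with ⟨hbi, hxe, _⟩
          exact (hFiff x).2 ⟨hbi, hxe⟩
        have hMAM : MA = M := by
          rcases List.mem_map.1 hMAmem with ⟨rm, hrm, hrm2⟩
          have h1 : MA ≤ M := hrm2 ▸ hMub _ (List.mem_map_of_mem (hrelsubF rm hrm))
          have h2 : M ≤ MA := hbstar2 ▸ hMAub _ (List.mem_map_of_mem (hrel ▸ hbstarRel))
          omega
        -- G is non-empty
        have hbstarG : bstar ∈ G := by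
          rcases (hFiff bstar).1 hbstarF with ⟨hbi, _⟩
          exact (hGiff bstar).2 ⟨hbi, by omega⟩
        cases hGsplit : G with
        | nil => rw [hGsplit] at hbstarG; exact absurd hbstarG (List.not_mem_nil)
        | cons g gs =>
          rw [pv_tail_cons]
          set mg := (gs.map Prod.fst).foldl min g.1 with hmgdef
          have hmg : PySem.List.min? ((g :: gs).map Prod.fst) (fun y => y) = some mg := by
            simp only [List.map_cons]; exact PySem.List.min?_id_cons _ _
          have hmgmem : mg ∈ (g :: gs).map Prod.fst := List.map_cons ▸ PySem.List.min?_mem hmg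
          have hmglb : ∀ y ∈ (g :: gs).map Prod.fst, mg ≤ y := PySem.List.min?_isMin hmg
          have hmA : PySem.List.min? ((r :: rs).map Prod.fst) (fun y => y)
              = some ((rs.map Prod.fst).foldl min r.1) := by
            simp only [List.map_cons]; exact PySem.List.min?_id_cons _ _
          set mA := (rs.map Prod.fst).foldl min r.1 with hmAdef
          have hmAmem : mA ∈ (r :: rs).map Prod.fst := List.map_cons ▸ PySem.List.min?_mem hmA
          have hmAlb : ∀ y ∈ (r :: rs).map Prod.fst, mA ≤ y := PySem.List.min?_isMin hmA
          have hrelsubG : ∀ x : Int × Int, x ∈ r :: rs → x ∈ g :: gs := by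
            intro x hx
            rcases (hreliff x).1 (hrel ▸ hx) with ⟨hbi, _, hxs⟩
            exact hGsplit ▸ (hGiff x).2 ⟨hbi, hxs⟩
          have hmgmA : mg = mA := by
            have h1 : mg ≤ mA := by
              rcases List.mem_map.1 hmAmem with ⟨rm, hrm, hrm2⟩
              exact hrm2 ▸ hmglb _ (List.mem_map_of_mem (hrelsubG rm hrm))
            have h2 : mA ≤ mg := by
              rcases List.mem_map.1 hmgmem with ⟨bg, hbgG, hbg1⟩
              rcases (hGiff bg).1 (hGsplit ▸ hbgG) with ⟨hbgbi, hbgs⟩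
              have hr1e : r.1 < e := ((hreliff r).1 (hrel ▸ List.mem_cons_self)).2.1
              have hmgr1 : mg ≤ r.1 :=
                hmglb _ (List.mem_map_of_mem (hrelsubG r List.mem_cons_self))
              have hbgRel : bg ∈ r :: rs := by
                rw [← hrel]
                exact (hreliff bg).2 ⟨hbgbi, by omega, hbgs⟩
              exact hbg1 ▸ hmAlb _ (List.mem_map_of_mem hbgRel)
            omega
          simp only [pvItem, pvExpandA, hrel, hMs, if_true]
          rw [hmgmA, ← hMAM, hmAdef, hMAdef]
    · -- M ≤ s : relevant must be empty
      have hrel : pvRelevant bi s e = [] := by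
        rw [List.eq_nil_iff_forall_not_mem]
        intro x hx
        rcases (hreliff x).1 hx with ⟨hxbi, hxe, hxs⟩
        have hxF : x ∈ F := (hFiff x).2 ⟨hxbi, hxe⟩
        have := hMub x.2 (List.mem_map_of_mem hxF)
        omega
      simp [pvItem, pvExpandA, hrel, hMs]



theorem pv_expB_eq (bi : List (Int × Int)) :
    ∀ (ivs : List (Int × Int)) (a b : Int), b ≤ a →
      List.Pairwise (· ≤ ·) (a :: pvFlat ivs) →
      pvExpB ivs ((PySem.List.sorted bi (fun x => x.1)).dropWhile (fun x => decide (x.1 < a)))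
        ((((PySem.List.sorted bi (fun x => x.1)).takeWhile (fun x => decide (x.1 < a))).map Prod.snd).foldl pvOptMax none)
        (pvTail ((PySem.List.sorted bi (fun x => x.2)).dropWhile (fun x => decide (x.2 ≤ b))))
      = ivs.map (pvExpandA bi) := by
  intro ivs
  induction ivs with
  | nil => intro a b _ _; rfl
  | cons iv rest ih =>
    intro a b hba hpw
    obtain ⟨s, e⟩ := iv
    have hflat : pvFlat ((s, e) :: rest) = s :: e :: pvFlat rest := by simp [pvFlat]
    rw [hflat] at hpw
    have has : a ≤ s := (List.pairwise_cons.1 hpw).1 s List.mem_cons_self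
    have hse : s ≤ e :=
      (List.pairwise_cons.1 (List.pairwise_cons.1 hpw).2).1 e List.mem_cons_self
    have hpwrest : List.Pairwise (· ≤ ·) (e :: pvFlat rest) :=
      (List.pairwise_cons.1 (List.pairwise_cons.1 hpw).2).2
    have himpS : ∀ x : Int × Int, decide (x.1 < a) = true → decide (x.1 < e) = true := by
      intro x h; simp at h ⊢; omega
    have himpE : ∀ x : Int × Int, decide (x.2 ≤ b) = true → decide (x.2 ≤ s) = true := by
      intro x h; simp at h ⊢; omega
    simp only [pvExpB]
    rw [pv_advS_spec e, pv_advT_tail s,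
      pv_dropWhile_dropWhile _ _ himpS, pv_dropWhile_dropWhile _ _ himpE]
    have hfold :
        ((((PySem.List.sorted bi (fun x => x.1)).dropWhile (fun x => decide (x.1 < a))).takeWhile
            (fun x => decide (x.1 < e))).map Prod.snd).foldl pvOptMax
          ((((PySem.List.sorted bi (fun x => x.1)).takeWhile (fun x => decide (x.1 < a))).map Prod.snd).foldl pvOptMax none)
        = (((PySem.List.sorted bi (fun x => x.1)).takeWhile (fun x => decide (x.1 < e))).map Prod.snd).foldl pvOptMax none := by
      rw [pv_takeWhile_split (fun x : Int × Int => decide (x.1 < e)) (fun x => decide (x.1 < a))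
        himpS (PySem.List.sorted bi (fun x => x.1)), List.map_append, List.foldl_append]
    rw [hfold, List.map_cons]
    exact congrArg₂ _ (pv_item_eq bi s e) (ih e s hse hpwrest)

theorem pv_bounds (bi : List (Int × Int)) (thr : Int)
    (hdom : Dom_compute_shared_intervals bi thr) :
    ∀ x ∈ bi, -2147483649 < x.1 ∧ -2147483649 < x.2 := by
  unfold Dom_compute_shared_intervals at hdom
  simp only [Bool.and_eq_true, List.all_eq_true] at hdom
  intro x hx
  have := hdom.1 x hx
  simp only [Bool.and_eq_true, pvDomInt, decide_eq_true_eq] at this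
  omega

theorem pv_sweep_pairwise (bi : List (Int × Int)) (thr : Int)
    (hdom : Dom_compute_shared_intervals bi thr) :
    List.Pairwise (· ≤ ·) ((-2147483649 : Int) :: pvFlat (pvSweep bi thr)) := by
  unfold pvSweep
  apply pv_sweep_aux thr _ _ 0 none [] (pv_sorted2_pairwise_fst (pvEvents bi))
  · intro ev hev x hx
    have hmem : ev ∈ pvEvents bi :=
      (PySem.List.sorted2_perm (pvEvents bi) _ _ false).mem_iff.1 hev
    rcases (pv_events_mem bi ev).1 hmem with ⟨p, hp, hcase⟩
    have hb := pv_bounds bi thr hdom p hp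
    have hx' : x = -2147483649 := by
      simpa [pvFlat] using hx
    rcases hcase with rfl | rfl <;> (subst hx'; simp; omega)
  · simp [pvFlat]

-- ===== VERDICT (by name: the statement is the Claim_ definition above) =====
theorem compute_shared_intervals_spec : Claim_equal_compute_shared_intervals := by
  intro bi thr hdom
  unfold Spec_compute_shared_intervals
  unfold compute_shared_intervals compute_shared_intervals_alt
  by_cases hivs : pvSweep bi thr = []
  · simp [hivs]
  · rw [if_neg hivs, if_neg hivs]
    have hb := pv_bounds bi thr hdom
    have hdropS : (PySem.List.sorted bi (fun x => x.1)).dropWhile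
        (fun x => decide (x.1 < (-2147483649 : Int))) = PySem.List.sorted bi (fun x => x.1) := by
      rw [List.dropWhile_eq_self_iff]
      intro hl
      have hmem := (PySem.List.sorted_perm bi (fun x => x.1) false).mem_iff.1
        (List.getElem_mem (l := PySem.List.sorted bi (fun x => x.1)) hl)
      have := hb _ hmem
      simp; omega
    have htakeS : (PySem.List.sorted bi (fun x => x.1)).takeWhile
        (fun x => decide (x.1 < (-2147483649 : Int))) = [] := by
      rw [List.takeWhile_eq_nil_iff]
      intro hl
      have hmem := (PySem.List.sorted_perm bi (fun x => x.1) false).mem_iff.1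
        (List.getElem_mem (l := PySem.List.sorted bi (fun x => x.1)) hl)
      have := hb _ hmem
      simp; omega
    have hdropE : (PySem.List.sorted bi (fun x => x.2)).dropWhile
        (fun x => decide (x.2 ≤ (-2147483649 : Int))) = PySem.List.sorted bi (fun x => x.2) := by
      rw [List.dropWhile_eq_self_iff]
      intro hl
      have hmem := (PySem.List.sorted_perm bi (fun x => x.2) false).mem_iff.1
        (List.getElem_mem (l := PySem.List.sorted bi (fun x => x.2)) hl)
      have := hb _ hmem
      simp; omega
    have hmain := pv_expB_eq bi (pvSweep bi thr) (-2147483649) (-2147483649) le_rfl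
      (pv_sweep_pairwise bi thr hdom)
    rw [hdropS, htakeS, hdropE] at hmain
    simp only [List.map_nil, List.foldl_nil] at hmain
    rw [hmain]
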